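-- pv_equiv track=rewrite | github.com/aabdulat1998/RetirementAgeCalculator | RetirementCalculator.py | month_calculator
-- ===== SOURCE A (Python) =====
-- def month_calculator(birth_month, retirement_year):
--     while birth_month > 12:
--         birth_month -= 12
--         retirement_year += 1
--
--     month_dict = {
--         1: "January",
--         2: "February",
--         3: "March",
--         4: "April",
--         5: "May",
--         6: "June",
--         7: "July",
--         8: "August",
--         9: "September",
--         10: "October",
--         11: "November",
--         12: "December"
--     }
--
--     return month_dict[birth_month], retirement_year
-- ===== SOURCE B (Python) =====
-- def month_calculator(birth_month, retirement_year):
--     if birth_month > 12: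
--         extra = (birth_month - 1) // 12
--         retirement_year += extra
--         birth_month -= 12 * extra
--
--     month_dict = {
--         1: "January",
--         2: "February",
--         3: "March",
--         4: "April",
--         5: "May",
--         6: "June",
--         7: "July",
--         8: "August",
--         9: "September",
--         10: "October",
--         11: "November",
--         12: "December"
--     }
--
--     return month_dict[birth_month], retirement_year
-- ===== Notes on version B (the rewrite author's own statement) =====
-- stated objective: faster
-- what changed: Replaces the subtract-12-per-iteration while loop with a single guarded closed-form floor-division step (extra = (birth_month-1)//12), keeping the final dict lookup unchanged.
import Mathlib
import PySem

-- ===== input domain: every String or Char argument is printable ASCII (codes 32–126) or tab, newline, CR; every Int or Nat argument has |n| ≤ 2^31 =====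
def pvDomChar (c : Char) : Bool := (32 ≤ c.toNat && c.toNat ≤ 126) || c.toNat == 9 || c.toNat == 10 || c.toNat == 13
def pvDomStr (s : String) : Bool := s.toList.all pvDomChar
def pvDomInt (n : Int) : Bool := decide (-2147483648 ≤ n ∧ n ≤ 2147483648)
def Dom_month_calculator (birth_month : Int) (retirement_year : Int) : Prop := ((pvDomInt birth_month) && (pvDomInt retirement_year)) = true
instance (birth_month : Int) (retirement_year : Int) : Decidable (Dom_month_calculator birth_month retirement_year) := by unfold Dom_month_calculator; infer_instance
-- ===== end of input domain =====

-- B replaces A's subtract-12-per-iteration while loop with one guarded closed-form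
-- floor-division step; objective: faster (O(1) normalization instead of O(birth_month/12)).


-- ===== PORT A =====
-- the month dict of both Pythons (dict → PySem.Dict, insertion order)
def pvMonthDict : PySem.Dict Int String :=
  PySem.Dict.ofList [(1, "January"), (2, "February"), (3, "March"), (4, "April"), (5, "May"), (6, "June"),
   (7, "July"), (8, "August"), (9, "September"), (10, "October"), (11, "November"), (12, "December")]

-- A's while loop, step for step (terminates since birth_month decreases by 12 while > 12)
def pvMonthLoop (birth_month : Int) (retirement_year : Int) : Int × Int :=
  if h : birth_month > 12 then pvMonthLoop (birth_month - 12) (retirement_year + 1)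
  else (birth_month, retirement_year)
termination_by birth_month.toNat
decreasing_by omega

-- month_dict[birth_month]: Python raises KeyError when the key is absent; Pre_ excludes that (.getD "" is never reached inside Pre_)
def month_calculator (birth_month : Int) (retirement_year : Int) : String × Int :=
  let p := pvMonthLoop birth_month retirement_year
  ((pvMonthDict.get? p.1).getD "", p.2)

-- ===== PORT B =====
def month_calculator_alt (birth_month : Int) (retirement_year : Int) : String × Int :=
  let p :=
    if birth_month > 12 then
      let extra := PySem.Int.floordiv (birth_month - 1) 12
      (birth_month - 12 * extra, retirement_year + extra)
    else (birth_month, retirement_year)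
  ((pvMonthDict.get? p.1).getD "", p.2)

-- ===== PRECONDITION & SPEC =====
-- Pre_ excludes birth_month ≤ 0, exactly where Python A's dict lookup raises KeyError
-- (every birth_month ≥ 1 is normalized by the loop into 1..12 and returns).
def Pre_month_calculator (birth_month : Int) (retirement_year : Int) : Prop := 1 ≤ birth_month
instance (birth_month : Int) (retirement_year : Int) : Decidable (Pre_month_calculator birth_month retirement_year) := by unfold Pre_month_calculator; infer_instance
def pvWitness_month_calculator : Int × Int := (25, 2030)

def Spec_month_calculator (birth_month : Int) (retirement_year : Int) (out : String × Int) : Prop := out = month_calculator_alt birth_month retirement_year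
instance (birth_month : Int) (retirement_year : Int) (out : String × Int) : Decidable (Spec_month_calculator birth_month retirement_year out) := by unfold Spec_month_calculator; infer_instance

-- ===== CLAIM (what is proved, stated in full; the proofs are below) =====
def Claim_equal_month_calculator : Prop := ∀ (birth_month : Int) (retirement_year : Int), Dom_month_calculator birth_month retirement_year → Pre_month_calculator birth_month retirement_year → Spec_month_calculator birth_month retirement_year (month_calculator birth_month retirement_year)

-- ===== LEMMAS AND PROOFS =====

-- A's loop equals the closed form on months ≥ 1 (stated with ediv; floordiv = ediv for the positive divisor 12)
theorem pvMonthLoop_closed (m y : Int) (hm : 1 ≤ m) :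
    pvMonthLoop m y = (m - 12 * ((m - 1) / 12), y + (m - 1) / 12) := by
  rw [pvMonthLoop]
  split_ifs with h
  · rw [pvMonthLoop_closed (m - 12) (y + 1) (by omega)]
    simp only [Prod.mk.injEq]
    constructor <;> omega
  · simp only [Prod.mk.injEq]
    constructor <;> omega
termination_by m.toNat
decreasing_by omega

theorem month_calculator_spec : Claim_equal_month_calculator := by
  intro m y _ hpre
  show _ = _
  unfold month_calculator month_calculator_alt
  rw [pvMonthLoop_closed m y hpre,
      PySem.Int.floordiv_eq_ediv_of_pos (b := 12) (by norm_num)]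
  split_ifs with h
  · rfl
  · have h0 : (m - 1) / 12 = 0 := by have hm : (1:Int) ≤ m := hpre; omega
    simp [h0]
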